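-- pv_equiv track=rewrite | github.com/jameslaight/adventofcode | 2025/10/10a.py | press
-- ===== SOURCE A (Python) =====
-- def press(state, goal, ops, current):
--     if current >= len(ops):
--         if state == goal:
--             return 0
--         else:
--             return len(ops) #maximum penalty
--
--     op = ops[current]
--
--     new_state = list(state)
--     for i in op:
--         new_state[i] ^= True #flip boolean
--
--     apply = press(new_state, goal, ops, current + 1) + 1
--     dont = press(state, goal, ops, current + 1)
--
--     return min(apply, dont)
-- ===== SOURCE B (Python) =====
-- # Meet-in-the-middle over the remaining operations: each op becomes a boolean
-- # effect vector, each half's subsets are collapsed into a dict effect -> min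
-- # presses, and the halves are combined by dict lookup against state XOR goal.
-- def press(state, goal, ops, current):
--     n = len(ops)
--     if current >= n:
--         return 0 if state == goal else n
--
--     L = len(state)
--     diff = tuple(s != g for s, g in zip(state, goal))
--
--     def xor(a, b):
--         return tuple(x != y for x, y in zip(a, b))
--
--     def effect(op):
--         v = [False] * L
--         for i in op:
--             v[i] = not v[i]
--         return tuple(v)
--
--     def table(masks):
--         t = {(False,) * L: 0}
--         for m in masks:
--             for k, c in list(t.items()):
--                 k2 = xor(k, m)
--                 if k2 not in t or t[k2] > c + 1:
--                     t[k2] = c + 1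
--         return t
--
--     masks = [effect(op) for op in ops[current:]]
--     h = len(masks) // 2
--     t1 = table(masks[:h])
--     t2 = table(masks[h:])
--     best = n  # not matching the goal costs the full penalty
--     for k, c in t1.items():
--         c2 = t2.get(xor(k, diff))
--         if c2 is not None and c + c2 < best:
--             best = c + c2
--     return best
-- ===== Notes on version B (the rewrite author's own statement) =====
-- stated objective: alternative
-- what changed: Replaces A's 2^m try/skip branching recursion with meet-in-the-middle over precomputed XOR effect vectors (each half's subsets collapsed into a dict effect->min presses, halves combined by dict lookup against state XOR goal); Pre_ excludes inputs where A raises IndexError, plus negative current (A's negative slice start accidentally re-walks the whole ops list) and state/goal of different lengths (A's 'never equal' penalty is an accident of list comparison, B's zip-based diff vector is undefined there).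
-- outside the precondition, e.g. on press([True], [False, False], [[0], [0]], 0): A returns 2, B returns 1; on press([True], [False], [[0], []], -1): A returns 1, B returns 2
import Mathlib
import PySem

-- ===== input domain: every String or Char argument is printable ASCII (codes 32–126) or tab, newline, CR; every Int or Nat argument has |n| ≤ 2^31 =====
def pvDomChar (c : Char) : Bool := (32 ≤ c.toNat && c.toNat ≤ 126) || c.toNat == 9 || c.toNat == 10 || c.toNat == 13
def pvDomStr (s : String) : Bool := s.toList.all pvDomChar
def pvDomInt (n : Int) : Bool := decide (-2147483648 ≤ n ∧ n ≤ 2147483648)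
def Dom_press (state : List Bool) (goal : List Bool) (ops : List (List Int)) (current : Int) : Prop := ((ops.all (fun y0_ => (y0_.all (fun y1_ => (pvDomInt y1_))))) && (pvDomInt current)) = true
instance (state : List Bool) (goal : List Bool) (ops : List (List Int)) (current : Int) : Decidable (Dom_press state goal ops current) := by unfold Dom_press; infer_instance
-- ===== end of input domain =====

-- B replaces A's try/skip branching recursion by meet-in-the-middle over precomputed
-- XOR effect vectors (dict effect -> min presses per half, combined by dict lookup).

-- ===== PORT A =====
-- new_state[i] ^= True  (IndexError, i.e. pyGet? = none, is excluded by Pre_press)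
def pressFlip (st : List Bool) (i : Int) : List Bool :=
  match PySem.List.pyGet? st i with
  | none => st
  | some b => PySem.List.pySetD st i (!b)

def press (state : List Bool) (goal : List Bool) (ops : List (List Int)) (current : Int) : Int :=
  if (ops.length : Int) ≤ current then
    (if state = goal then 0 else (ops.length : Int))
  else
    match PySem.List.pyGet? ops current with
    | none => 0  -- IndexError in Python; excluded by Pre_press
    | some op =>
      let new_state := op.foldl pressFlip state
      min (press new_state goal ops (current + 1) + 1) (press state goal ops (current + 1))
termination_by ((ops.length : Int) - current).toNat
decreasing_by all_goals omega

-- ===== PORT B =====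
-- tuple(x != y for x, y in zip(a, b))
def altXor (a b : List Bool) : List Bool := List.zipWith (fun x y => x != y) a b

-- v[i] = not v[i]  (IndexError, i.e. pyGet? = none, is excluded by Pre_press)
def altFlip (v : List Bool) (i : Int) : List Bool :=
  match PySem.List.pyGet? v i with
  | none => v
  | some b => PySem.List.pySetD v i (!b)

-- effect(op): v = [False]*L; for i in op: v[i] = not v[i]
def altEffect (L : Nat) (op : List Int) : List Bool :=
  op.foldl altFlip (List.replicate L false)

-- inner body of table's loop: if k2 not in t or t[k2] > c + 1: t[k2] = c + 1
def altStep (m : List Bool) (t : PySem.Dict (List Bool) Int) (kc : List Bool × Int) :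
    PySem.Dict (List Bool) Int :=
  let k2 := altXor kc.1 m
  match t.get? k2 with
  | none => t.insert k2 (kc.2 + 1)
  | some v => if kc.2 + 1 < v then t.insert k2 (kc.2 + 1) else t

-- table(masks): subsets of masks collapsed to a dict effect -> min presses
def altTable (L : Nat) (ms : List (List Bool)) : PySem.Dict (List Bool) Int :=
  ms.foldl (fun t m => t.items.foldl (altStep m) t)
    (PySem.Dict.empty.insert (List.replicate L false) 0)

-- body of the combine loop over t1.items, folding the running best
def altCombine (t2 : PySem.Dict (List Bool) Int) (diff : List Bool)
    (best : Int) (kc : List Bool × Int) : Int :=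
  match t2.get? (altXor kc.1 diff) with
  | none => best
  | some c2 => if kc.2 + c2 < best then kc.2 + c2 else best

def press_alt (state : List Bool) (goal : List Bool) (ops : List (List Int)) (current : Int) : Int :=
  let n : Int := ops.length
  if n ≤ current then (if state = goal then 0 else n)
  else
    let L := state.length
    let diff := altXor state goal
    let masks := (PySem.List.slice ops (some current) none).map (altEffect L)
    let h := masks.length / 2
    let t1 := altTable L (PySem.List.slice masks none (some (h : Int)))
    let t2 := altTable L (PySem.List.slice masks (some (h : Int)) none)
    t1.items.foldl (altCombine t2 diff) n

-- ===== PRECONDITION & SPEC =====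
-- Pre_ excludes exactly: inputs where A raises IndexError (an op index out of range for
-- state, or current below -len(ops)); negative current on which A's negative slice start
-- accidentally re-walks the whole ops list; and state/goal of different lengths, where
-- A's penalty value is an accident of list comparison and B's zip diff is undefined.
def Pre_press (state : List Bool) (goal : List Bool) (ops : List (List Int)) (current : Int) : Prop :=
  (ops.length : Int) ≤ current ∨
  (0 ≤ current ∧ state.length = goal.length ∧
    ∀ op ∈ ops.drop current.toNat,
      ∀ i ∈ op, -(state.length : Int) ≤ i ∧ i < (state.length : Int))

instance (state : List Bool) (goal : List Bool) (ops : List (List Int)) (current : Int) :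
    Decidable (Pre_press state goal ops current) := by unfold Pre_press; infer_instance

def pvWitness_press : List Bool × List Bool × List (List Int) × Int :=
  ([true, false], [false, false], [[0], [1]], 0)

def Spec_press (state : List Bool) (goal : List Bool) (ops : List (List Int)) (current : Int) (out : Int) : Prop := out = press_alt state goal ops current
instance (state : List Bool) (goal : List Bool) (ops : List (List Int)) (current : Int) (out : Int) : Decidable (Spec_press state goal ops current out) := by unfold Spec_press; infer_instance

-- ===== CLAIM (what is proved, stated in full; the proofs are below) =====
def Claim_equal_press : Prop := ∀ (state : List Bool) (goal : List Bool) (ops : List (List Int)) (current : Int), Dom_press state goal ops current → Pre_press state goal ops current → Spec_press state goal ops current (press state goal ops current)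

-- ===== LEMMAS AND PROOFS =====

-- ---- proof-side abbreviations ----
def zeros (L : Nat) : List Bool := List.replicate L false

-- min on Option Int, none = "no subset matches" (+infinity)
def omin : Option Int → Option Int → Option Int
  | none, b => b
  | some a, none => some a
  | some a, some b => some (min a b)

def oinc (o : Option Int) : Option Int := o.map (fun c => c + 1)

-- cap with the running best / penalty n
def gcap (n : Int) : Option Int → Int
  | none => n
  | some c => min n c

-- minimal number of masks from `l` (a list, with multiplicity) whose XOR is `k`
def bc (L : Nat) : List (List Bool) → List Bool → Option Int
  | [], k => if k = zeros L then some 0 else none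
  | m :: t, k => omin (bc L t k) (oinc (bc L t (altXor k m)))

-- all subsets of `l` as (xor, size) pairs
def sl (L : Nat) : List (List Bool) → List (List Bool × Int)
  | [] => [(zeros L, 0)]
  | m :: t => sl L t ++ (sl L t).map (fun kc => (altXor kc.1 m, kc.2 + 1))

def OminL (l : List (Option Int)) : Option Int := l.foldr omin none

-- "o1 ≤ o2" with none = +infinity
def ole (o1 o2 : Option Int) : Prop := ∀ c, o2 = some c → ∃ c', o1 = some c' ∧ c' ≤ c

def TInv (L : Nat) (t : PySem.Dict (List Bool) Int) : Prop :=
  t.keys.Nodup ∧ ∀ k ∈ t.keys, k.length = L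

def nidx (L : Nat) (i : Int) : Nat := (PySem.Int.mod i (L : Int)).toNat

def flipN (v : List Bool) (j : Nat) : List Bool := v.set j (!(v.getD j false))

-- proof-side effect vector, with the index already reduced mod L
def mEffect (L : Nat) (op : List Int) : List Bool :=
  op.foldl (fun v i => flipN v (nidx L i)) (zeros L)

def remA (ops : List (List Int)) (current : Int) : List (List Int) :=
  ops.drop current.toNat

-- ---- xor-vector facts ----
theorem length_altXor (a b : List Bool) : (altXor a b).length = min a.length b.length := by
  simp [altXor]

theorem altXor_comm (a b : List Bool) : altXor a b = altXor b a := by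
  unfold altXor
  rw [List.zipWith_comm]
  congr 1; funext x y; cases x <;> cases y <;> rfl

theorem altXor_assoc (a b c : List Bool) : altXor (altXor a b) c = altXor a (altXor b c) := by
  induction a generalizing b c with
  | nil => simp [altXor]
  | cons x xs ih =>
    cases b with
    | nil => simp [altXor]
    | cons y ys =>
      cases c with
      | nil => simp [altXor]
      | cons z zs =>
        show (((x != y) != z) :: altXor (altXor xs ys) zs) = ((x != (y != z)) :: altXor xs (altXor ys zs))
        rw [ih ys zs]
        congr 1
        cases x <;> cases y <;> cases z <;> rfl

theorem altXor_swap (k a m : List Bool) : altXor (altXor k a) m = altXor (altXor k m) a := by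
  rw [altXor_assoc, altXor_assoc, altXor_comm a m]

theorem altXor_zeros_left (L : Nat) (a : List Bool) (h : a.length = L) :
    altXor (zeros L) a = a := by
  subst h
  induction a with
  | nil => rfl
  | cons x xs ih => cases x <;> simpa [altXor, zeros, List.replicate_succ] using ih

theorem altXor_zeros_right (L : Nat) (a : List Bool) (h : a.length = L) :
    altXor a (zeros L) = a := by
  subst h
  induction a with
  | nil => rfl
  | cons x xs ih => cases x <;> simpa [altXor, zeros, List.replicate_succ] using ih

theorem altXor_cancel (a b : List Bool) (h : a.length = b.length) :
    altXor (altXor a b) b = a := by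
  induction a generalizing b with
  | nil => cases b <;> simp [altXor]
  | cons x xs ih =>
    cases b with
    | nil => simp at h
    | cons y ys =>
      simp only [List.length_cons, Nat.add_right_cancel_iff] at h
      show (((x != y) != y) :: altXor (altXor xs ys) ys) = x :: xs
      rw [ih ys h]
      congr 1
      cases x <;> cases y <;> rfl

theorem altXor_eq_zeros_iff (a b : List Bool) (h : a.length = b.length) :
    (altXor a b = zeros a.length ↔ a = b) := by
  induction a generalizing b with
  | nil => cases b <;> simp_all [altXor, zeros]
  | cons x xs ih =>
    cases b with
    | nil => simp at h
    | cons y ys =>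
      simp only [List.length_cons, Nat.add_right_cancel_iff] at h
      show (((x != y) :: altXor xs ys) = zeros (xs.length + 1) ↔ _)
      have : zeros (xs.length + 1) = false :: zeros xs.length := by
        simp [zeros, List.replicate_succ]
      rw [this]
      simp only [List.cons.injEq]
      rw [ih ys h]
      constructor
      · rintro ⟨h1, h2⟩; exact ⟨by cases x <;> cases y <;> simp_all, h2⟩
      · rintro ⟨h1, h2⟩; subst h1 h2; exact ⟨by cases x <;> rfl, rfl⟩

-- ---- omin / oinc / ole facts ----
theorem omin_none_right (o : Option Int) : omin o none = o := by cases o <;> rfl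

theorem omin_comm (a b : Option Int) : omin a b = omin b a := by
  cases a <;> cases b <;> simp [omin, min_comm]

theorem omin_assoc (a b c : Option Int) : omin (omin a b) c = omin a (omin b c) := by
  cases a <;> cases b <;> cases c <;> simp [omin, min_assoc]

theorem omin_left_comm (a b c : Option Int) : omin a (omin b c) = omin b (omin a c) := by
  rw [← omin_assoc, omin_comm a b, omin_assoc]

theorem oinc_omin (a b : Option Int) : oinc (omin a b) = omin (oinc a) (oinc b) := by
  cases a <;> cases b <;> simp [omin, oinc, min_add_add_right]

theorem ole_refl (o : Option Int) : ole o o := by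
  intro c hc; exact ⟨c, hc, le_refl c⟩

theorem ole_antisymm (a b : Option Int) (h1 : ole a b) (h2 : ole b a) : a = b := by
  cases a with
  | none => cases b with
    | none => rfl
    | some vb => obtain ⟨c', hc', _⟩ := h1 vb rfl; cases hc'
  | some va => cases b with
    | none => obtain ⟨c', hc', _⟩ := h2 va rfl; cases hc'
    | some vb =>
      obtain ⟨c1, hc1, hle1⟩ := h1 vb rfl
      obtain ⟨c2, hc2, hle2⟩ := h2 va rfl
      simp at hc1 hc2; subst hc1 hc2
      exact congrArg some (le_antisymm hle1 hle2)

theorem ole_omin_left (a b : Option Int) : ole (omin a b) a := by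
  intro c hc; cases a with
  | none => cases hc
  | some va =>
    cases b with
    | none => simp [omin] at hc ⊢; omega
    | some vb => simp [omin] at hc ⊢; subst hc; omega

theorem ole_omin_right (a b : Option Int) : ole (omin a b) b := by
  intro c hc; cases b with
  | none => cases hc
  | some vb =>
    cases a with
    | none => simp [omin] at hc ⊢; omega
    | some va => simp [omin] at hc ⊢; subst hc; omega

theorem ole_omin_both (o a b : Option Int) (h1 : ole o a) (h2 : ole o b) : ole o (omin a b) := by
  intro c hc
  cases a with
  | none => exact h2 c (by simpa [omin] using hc)
  | some va =>
    cases b with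
    | none => exact h1 c (by simpa [omin] using hc)
    | some vb =>
      simp [omin] at hc
      obtain ⟨c1, hc1, hle1⟩ := h1 va rfl
      obtain ⟨c2, hc2, hle2⟩ := h2 vb rfl
      rw [hc1] at hc2; simp at hc2; subst hc2
      exact ⟨c1, hc1, by omega⟩

theorem ole_trans (a b c : Option Int) (h1 : ole a b) (h2 : ole b c) : ole a c := by
  intro c hc
  obtain ⟨c1, hc1, hle1⟩ := h2 c hc
  obtain ⟨c2, hc2, hle2⟩ := h1 c1 hc1
  exact ⟨c2, hc2, by omega⟩

theorem gcap_omin (n : Int) (hn : 1 ≤ n) (o1 o2 : Option Int) :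
    gcap n (omin o1 (oinc o2)) = min (gcap n o2 + 1) (gcap n o1) := by
  cases o1 <;> cases o2 <;> simp [gcap, omin, oinc] <;> omega

theorem gcap_gcap (b : Int) (o1 o2 : Option Int) :
    gcap (gcap b o1) o2 = gcap b (omin o1 o2) := by
  cases o1 <;> cases o2 <;> simp [gcap, omin, min_assoc]

-- ---- bc facts ----
theorem bc_snoc (L : Nat) (p : List (List Bool)) (m k : List Bool) :
    bc L (p ++ [m]) k = omin (bc L p k) (oinc (bc L p (altXor k m))) := by
  induction p generalizing k with
  | nil => rfl
  | cons a p ih =>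
    show omin (bc L (p ++ [m]) k) (oinc (bc L (p ++ [m]) (altXor k a))) = _
    rw [ih k, ih (altXor k a), altXor_swap k a m]
    show _ = omin (omin (bc L p k) (oinc (bc L p (altXor k a))))
      (oinc (omin (bc L p (altXor k m)) (oinc (bc L p (altXor (altXor k m) a)))))
    rw [oinc_omin, oinc_omin]
    simp only [omin_assoc]
    rw [omin_left_comm (oinc (bc L p (altXor k m)))]

-- ---- effect-vector facts ----
theorem length_flipN (v : List Bool) (j : Nat) : (flipN v j).length = v.length := by
  simp [flipN]

theorem length_mEffect (L : Nat) (op : List Int) : (mEffect L op).length = L := by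
  unfold mEffect
  suffices h : ∀ (op : List Int) (v : List Bool),
      (op.foldl (fun v i => flipN v (nidx L i)) v).length = v.length by
    rw [h]; simp [zeros]
  intro op
  induction op with
  | nil => intro v; rfl
  | cons i t ih => intro v; rw [List.foldl_cons, ih, length_flipN]

-- ---- flips = xor with mod-reduced index ----
theorem pressFlip_eq_flipN (st : List Bool) (i : Int)
    (h1 : -(st.length : Int) ≤ i) (h2 : i < (st.length : Int)) :
    pressFlip st i = flipN st (nidx st.length i) ∧ nidx st.length i < st.length := by
  have hL : 0 < st.length := by omega
  have hb : (0 : Int) < (st.length : Int) := by exact_mod_cast hL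
  have hmod : PySem.Int.mod i (st.length : Int) = i % (st.length : Int) :=
    PySem.Int.mod_eq_emod_of_pos hb
  have he1 : 0 ≤ i % (st.length : Int) := Int.emod_nonneg i (by omega)
  have he2 : i % (st.length : Int) < (st.length : Int) := Int.emod_lt_of_pos i hb
  have hjlt2 : (PySem.Int.mod i (st.length : Int)).toNat < st.length := by rw [hmod]; omega
  have hjlt : nidx st.length i < st.length := hjlt2
  have hidx2 : PySem.List.pyIdx? st.length i = some ((i % (st.length : Int)).toNat) := by
    unfold PySem.List.pyIdx?
    split_ifs with c1
    · simp only [Option.some.injEq]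
      have := Int.emod_eq_of_lt c1 h2
      omega
    · simp only [Option.some.injEq]
      have heq : (i + (st.length : Int)) % (st.length : Int) = i % (st.length : Int) := by
        simpa using Int.add_mul_emod_self_left (a := i) (b := (st.length : Int)) (c := 1)
      have := Int.emod_eq_of_lt (a := i + st.length) (b := (st.length : Int)) (by omega) (by omega)
      omega
  have hidx : PySem.List.pyIdx? st.length i = some (nidx st.length i) := by
    rw [hidx2]
    congr 1
    show _ = (PySem.Int.mod i ((st.length : Nat) : Int)).toNat
    rw [hmod]
  refine ⟨?_, hjlt⟩
  unfold pressFlip PySem.List.pyGet?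
  rw [hidx]
  simp only [Option.bind_some]
  rw [List.getElem?_eq_getElem hjlt]
  simp only [flipN, PySem.List.pySetD, PySem.List.pySet?, hidx, Option.map_some, Option.getD_some]
  rw [List.getD_eq_getElem st false hjlt]

theorem flip_zx (a b : List Bool) (h : a.length = b.length) (j : Nat) (hj : j < b.length) :
    flipN (altXor a b) j = altXor a (flipN b j) := by
  have hz : (altXor a b).length = b.length := by rw [length_altXor]; omega
  have hgd1 : (altXor a b).getD j false = (altXor a b)[j]'(by omega) :=
    List.getD_eq_getElem _ false (by omega)
  have hgd2 : b.getD j false = b[j]'hj := List.getD_eq_getElem _ false hj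
  apply List.ext_getElem
  · simp [flipN, altXor]
  · intro p hp1 hp2
    have hpb : p < b.length := by
      have := hp1; simp only [flipN, List.length_set] at this; omega
    have hpa : p < a.length := by omega
    simp only [flipN, hgd2, altXor, List.getElem_set, List.getElem_zipWith]
    by_cases hpj : j = p
    · subst hpj
      simp only [altXor] at hgd1
      simp only [if_true, hgd1, List.getElem_zipWith]
      cases a[j] <;> cases b[j] <;> rfl
    · simp [hpj]

theorem foldl_flip_zx (op : List Int) (a : List Bool) :
    ∀ b : List Bool, a.length = b.length →
    (∀ i ∈ op, -(a.length : Int) ≤ i ∧ i < (a.length : Int)) →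
    op.foldl pressFlip (altXor a b) = altXor a (op.foldl (fun v i => flipN v (nidx a.length i)) b) := by
  induction op with
  | nil => intro b _ _; rfl
  | cons i t ih =>
    intro b hlen hv
    have hi := hv i (by simp)
    have hzlen : (altXor a b).length = a.length := by rw [length_altXor]; omega
    obtain ⟨hflip, hjlt⟩ := pressFlip_eq_flipN (altXor a b) i (by omega) (by omega)
    have hnn : nidx (altXor a b).length i = nidx a.length i := by rw [hzlen]
    have hjlt' : nidx a.length i < b.length := by rw [hnn] at hjlt; omega
    rw [List.foldl_cons, List.foldl_cons, hflip, hzlen, flip_zx a b hlen _ hjlt']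
    exact ih (flipN b (nidx a.length i)) (by rw [length_flipN]; exact hlen)
      (fun x hx => hv x (by simp [hx]))

theorem foldl_flip_eff (st : List Bool) (op : List Int)
    (hv : ∀ i ∈ op, -(st.length : Int) ≤ i ∧ i < (st.length : Int)) :
    op.foldl pressFlip st = altXor st (mEffect st.length op) := by
  unfold mEffect
  have h0 : altXor st (zeros st.length) = st := altXor_zeros_right st.length st rfl
  conv_lhs => rw [← h0]
  exact foldl_flip_zx op st (zeros st.length) (by simp [zeros]) hv

-- B's effect loop computes the same vector (altFlip and pressFlip share their body)
theorem altEffect_eq_mEffect (L : Nat) (op : List Int)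
    (hv : ∀ i ∈ op, -(L : Int) ≤ i ∧ i < (L : Int)) :
    altEffect L op = mEffect L op := by
  have hfl : op.foldl altFlip (zeros L) = op.foldl pressFlip (zeros L) := rfl
  have hzl : (zeros L).length = L := by simp [zeros]
  have := foldl_flip_eff (zeros L) op (by rw [hzl]; exact hv)
  show op.foldl altFlip (zeros L) = mEffect L op
  rw [hfl, this, hzl]
  unfold mEffect
  exact altXor_zeros_left L _ (by rw [hzl] at *; exact length_mEffect L op)

-- ---- remaining-ops list ----
theorem rem_base (ops : List (List Int)) (current : Int) (h0 : 0 ≤ current)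
    (h : (ops.length : Int) ≤ current) : remA ops current = [] := by
  unfold remA
  rw [List.drop_eq_nil_iff]
  omega

theorem rem_cons (ops : List (List Int)) (current : Int)
    (h1 : 0 ≤ current) (h2 : current < (ops.length : Int)) :
    ∃ op, PySem.List.pyGet? ops current = some op ∧
      remA ops current = op :: remA ops (current + 1) := by
  have hlt : current.toNat < ops.length := by omega
  refine ⟨ops[current.toNat], ?_, ?_⟩
  · rw [PySem.List.pyGet?_of_nonneg ops h1, List.getElem?_eq_getElem hlt]
  · unfold remA
    rw [List.drop_eq_getElem_cons hlt]
    have hnat : (current + 1).toNat = current.toNat + 1 := by omega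
    rw [hnat]

-- ---- A-side characterisation ----
theorem press_bc (goal : List Bool) (ops : List (List Int)) :
    ∀ (k : Nat) (current : Int) (state : List Bool),
    ((ops.length : Int) - current).toNat ≤ k →
    state.length = goal.length → 0 ≤ current →
    (∀ op ∈ remA ops current, ∀ i ∈ op, -(state.length : Int) ≤ i ∧ i < (state.length : Int)) →
    press state goal ops current =
      gcap (ops.length)
        (bc state.length ((remA ops current).map (mEffect state.length)) (altXor state goal)) := by
  intro k
  induction k with
  | zero =>
    intro current state hk hlen hge hvalid
    have hb : (ops.length : Int) ≤ current := by omega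
    rw [press, if_pos hb, rem_base ops current hge hb]
    simp only [List.map_nil]
    have hiff := altXor_eq_zeros_iff state goal hlen
    by_cases hsg : state = goal
    · rw [if_pos hsg]
      have : altXor state goal = zeros state.length := hiff.2 hsg
      simp [bc, this, gcap]
    · rw [if_neg hsg]
      have : ¬ (altXor state goal = zeros state.length) := fun hh => hsg (hiff.1 hh)
      simp only [bc, if_neg this, gcap]
  | succ k ih =>
    intro current state hk hlen hge hvalid
    by_cases hb : (ops.length : Int) ≤ current
    · rw [press, if_pos hb, rem_base ops current hge hb]
      simp only [List.map_nil]
      have hiff := altXor_eq_zeros_iff state goal hlen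
      by_cases hsg : state = goal
      · rw [if_pos hsg]
        have : altXor state goal = zeros state.length := hiff.2 hsg
        simp [bc, this, gcap]
      · rw [if_neg hsg]
        have : ¬ (altXor state goal = zeros state.length) := fun hh => hsg (hiff.1 hh)
        simp only [bc, if_neg this, gcap]
    · obtain ⟨op, hget, hrem⟩ := rem_cons ops current hge (by omega)
      have hvop : ∀ i ∈ op, -(state.length : Int) ≤ i ∧ i < (state.length : Int) :=
        hvalid op (by rw [hrem]; exact List.mem_cons_self)
      have hvtail : ∀ op' ∈ remA ops (current + 1), ∀ i ∈ op',
          -(state.length : Int) ≤ i ∧ i < (state.length : Int) :=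
        fun op' hop' => hvalid op' (by rw [hrem]; exact List.mem_cons_of_mem _ hop')
      have hnew : op.foldl pressFlip state = altXor state (mEffect state.length op) :=
        foldl_flip_eff state op hvop
      have hlen' : (altXor state (mEffect state.length op)).length = state.length := by
        rw [length_altXor, length_mEffect]; omega
      have h1 := ih (current + 1) (altXor state (mEffect state.length op)) (by omega)
        (by rw [hlen']; exact hlen) (by omega) (by rw [hlen']; exact hvtail)
      rw [hlen'] at h1
      have hswap : altXor (altXor state (mEffect state.length op)) goal =
          altXor (altXor state goal) (mEffect state.length op) :=
        altXor_swap state (mEffect state.length op) goal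
      rw [hswap] at h1
      have h2 := ih (current + 1) state (by omega) hlen (by omega) hvtail
      rw [press]
      simp only [if_neg hb, hget]
      rw [hnew, h1, h2, hrem]
      simp only [List.map_cons, bc]
      rw [gcap_omin (ops.length) (by omega)]

-- ---- dict table ----
theorem dict_get?_eq_lookup (t : PySem.Dict (List Bool) Int) (k : List Bool) :
    t.items.lookup k = t.get? k := by
  obtain ⟨items⟩ := t
  induction items with
  | nil => rfl
  | cons p rest ih =>
    obtain ⟨kk, vv⟩ := p
    rw [PySem.Dict.get?_mk_cons]
    show List.lookup k ((kk, vv) :: rest) = _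
    by_cases h : kk = k
    · subst h; simp [List.lookup]
    · have h1 : (k == kk) = false := by simp [Ne.symm h]
      have h2 : (kk == k) = false := by simp [h]
      simp only [List.lookup, h1, h2]
      exact ih

theorem foldA_step (m : List Bool) (acc : PySem.Dict (List Bool) Int) (kc : List Bool × Int)
    (q : List Bool) :
    (altStep m acc kc).get? q =
      if altXor kc.1 m = q then omin (acc.get? q) (some (kc.2 + 1)) else acc.get? q := by
  unfold altStep
  dsimp only
  cases hg : acc.get? (altXor kc.1 m) with
  | none =>
    dsimp only
    rw [PySem.Dict.get?_insert]
    by_cases he : altXor kc.1 m = q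
    · rw [if_pos he, if_pos he.symm]
      rw [← he, hg]
      rfl
    · rw [if_neg he, if_neg (fun hh => he hh.symm)]
  | some v =>
    dsimp only
    by_cases hlt : kc.2 + 1 < v
    · rw [if_pos hlt, PySem.Dict.get?_insert]
      by_cases he : altXor kc.1 m = q
      · rw [if_pos he, if_pos he.symm, ← he, hg]
        simp [omin, min_eq_right (by omega : kc.2 + 1 ≤ v)]
      · rw [if_neg he, if_neg (fun hh => he hh.symm)]
    · rw [if_neg hlt]
      by_cases he : altXor kc.1 m = q
      · rw [if_pos he, ← he, hg]
        simp [omin, min_eq_left (by omega : v ≤ kc.2 + 1)]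
      · rw [if_neg he]

theorem foldA (m : List Bool) :
    ∀ (l : List (List Bool × Int)) (acc : PySem.Dict (List Bool) Int) (q : List Bool),
    ((l.foldl (altStep m) acc).get? q) =
      l.foldl (fun o kc => if altXor kc.1 m = q then omin o (some (kc.2 + 1)) else o) (acc.get? q) := by
  intro l
  induction l with
  | nil => intro acc q; rfl
  | cons kc l ih =>
    intro acc q
    rw [List.foldl_cons, List.foldl_cons, ih, foldA_step]

theorem foldTInv (L : Nat) (m : List Bool) (hm : m.length = L) :
    ∀ (l : List (List Bool × Int)) (acc : PySem.Dict (List Bool) Int),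
    (∀ kc ∈ l, (kc.1 : List Bool).length = L) → TInv L acc →
    TInv L (l.foldl (altStep m) acc) := by
  intro l
  induction l with
  | nil => intro acc _ h; exact h
  | cons kc l ih =>
    intro acc hl hacc
    rw [List.foldl_cons]
    refine ih _ (fun x hx => hl x (List.mem_cons_of_mem _ hx)) ?_
    have hk1 : (kc.1 : List Bool).length = L := hl kc List.mem_cons_self
    have hk2 : (altXor kc.1 m).length = L := by rw [length_altXor]; omega
    unfold altStep
    dsimp only
    cases hg : acc.get? (altXor kc.1 m) with
    | none =>
      dsimp only
      refine ⟨PySem.Dict.nodup_keys_insert _ _ _ hacc.1, ?_⟩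
      intro k hk
      rcases (PySem.Dict.mem_keys_insert _ _ _ _).1 hk with h | h
      · rw [h]; exact hk2
      · exact hacc.2 k h
    | some v =>
      dsimp only
      by_cases hlt : kc.2 + 1 < v
      · rw [if_pos hlt]
        refine ⟨PySem.Dict.nodup_keys_insert _ _ _ hacc.1, ?_⟩
        intro k hk
        rcases (PySem.Dict.mem_keys_insert _ _ _ _).1 hk with h | h
        · rw [h]; exact hk2
        · exact hacc.2 k h
      · rw [if_neg hlt]; exact hacc

theorem fold_no_match (m q : List Bool) :
    ∀ (l : List (List Bool × Int)) (o : Option Int),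
    (∀ kc ∈ l, altXor kc.1 m ≠ q) →
    l.foldl (fun o kc => if altXor kc.1 m = q then omin o (some (kc.2 + 1)) else o) o = o := by
  intro l
  induction l with
  | nil => intro o _; rfl
  | cons kc l ih =>
    intro o h
    rw [List.foldl_cons, if_neg (h kc List.mem_cons_self)]
    exact ih o (fun x hx => h x (List.mem_cons_of_mem _ hx))

theorem foldl_pick (L : Nat) (m q : List Bool) (hm : m.length = L) (hq : q.length = L) :
    ∀ (l : List (List Bool × Int)) (o : Option Int),
    (∀ kc ∈ l, (kc.1 : List Bool).length = L) → (l.map Prod.fst).Nodup →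
    l.foldl (fun o kc => if altXor kc.1 m = q then omin o (some (kc.2 + 1)) else o) o =
      (match l.lookup (altXor q m) with
       | none => o
       | some c => omin o (some (c + 1))) := by
  intro l
  induction l with
  | nil => intro o _ _; rfl
  | cons kc l ih =>
    intro o hl hnd
    have hk1 : (kc.1 : List Bool).length = L := hl kc List.mem_cons_self
    have hnd' : (l.map Prod.fst).Nodup := by
      have : (kc.1 :: l.map Prod.fst).Nodup := by simpa using hnd
      exact (List.nodup_cons.1 this).2
    rw [List.foldl_cons]
    by_cases hk : kc.1 = altXor q m
    · have hcond : altXor kc.1 m = q := by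
        rw [hk]; exact altXor_cancel q m (by omega)
      rw [if_pos hcond]
      have hlook : List.lookup (altXor q m) (kc :: l) = some kc.2 := by
        obtain ⟨k1, v1⟩ := kc
        simp only at hk
        simp [List.lookup, hk]
      rw [hlook]
      apply fold_no_match
      intro kc' hkc' hcc
      have hlen' : (kc'.1 : List Bool).length = L := hl kc' (List.mem_cons_of_mem _ hkc')
      have h1 : altXor (altXor kc'.1 m) m = kc'.1 := altXor_cancel kc'.1 m (by omega)
      rw [hcc] at h1
      have hmem : kc.1 ∈ l.map Prod.fst := by
        rw [hk, h1]
        exact List.mem_map_of_mem hkc'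
      have : kc.1 ∉ l.map Prod.fst := by
        have h2 : (kc.1 :: l.map Prod.fst).Nodup := by simpa using hnd
        exact (List.nodup_cons.1 h2).1
      exact this hmem
    · have hcond : ¬ (altXor kc.1 m = q) := by
        intro hcc
        have h1 : altXor (altXor kc.1 m) m = kc.1 := altXor_cancel kc.1 m (by omega)
        rw [hcc] at h1
        exact hk h1.symm
      rw [if_neg hcond]
      have hlook : List.lookup (altXor q m) (kc :: l) = List.lookup (altXor q m) l := by
        obtain ⟨k1, v1⟩ := kc
        simp only at hk
        have hbeq : (altXor q m == k1) = false := by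
          simp only [beq_eq_false_iff_ne, ne_eq]
          intro h; exact hk h.symm
        simp [List.lookup, hbeq]
      rw [hlook]
      exact ih o (fun x hx => hl x (List.mem_cons_of_mem _ hx)) hnd'

theorem step_get? (L : Nat) (m : List Bool) (hm : m.length = L)
    (t : PySem.Dict (List Bool) Int) (ht : TInv L t) (q : List Bool) (hq : q.length = L) :
    ((t.items.foldl (altStep m) t).get? q) = omin (t.get? q) (oinc (t.get? (altXor q m))) := by
  rw [foldA]
  rw [foldl_pick L m q hm hq t.items (t.get? q)
    (fun kc hkc => ht.2 kc.1 (PySem.Dict.mem_keys_of_mem_items t hkc)) ht.1]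
  rw [dict_get?_eq_lookup]
  cases t.get? (altXor q m) with
  | none =>
    dsimp only [oinc, Option.map_none]
    exact (omin_none_right _).symm
  | some c => rfl

theorem table_spec (L : Nat) :
    ∀ (ms : List (List Bool)) (p : List (List Bool)) (t : PySem.Dict (List Bool) Int),
    (∀ m ∈ ms, (m : List Bool).length = L) → TInv L t →
    (∀ k : List Bool, k.length = L → t.get? k = bc L p k) →
    TInv L (ms.foldl (fun t m => t.items.foldl (altStep m) t) t) ∧
    (∀ k : List Bool, k.length = L →
      (ms.foldl (fun t m => t.items.foldl (altStep m) t) t).get? k = bc L (p ++ ms) k) := by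
  intro ms
  induction ms with
  | nil =>
    intro p t _ ht hs
    refine ⟨ht, ?_⟩
    intro k hk
    rw [List.append_nil]
    exact hs k hk
  | cons m ms ih =>
    intro p t hms ht hs
    have hm : m.length = L := hms m List.mem_cons_self
    have hlens : ∀ kc ∈ t.items, (kc.1 : List Bool).length = L :=
      fun kc hkc => ht.2 kc.1 (PySem.Dict.mem_keys_of_mem_items t hkc)
    have ht' : TInv L (t.items.foldl (altStep m) t) := foldTInv L m hm t.items t hlens ht
    have hs' : ∀ k : List Bool, k.length = L →
        (t.items.foldl (altStep m) t).get? k = bc L (p ++ [m]) k := by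
      intro k hk
      rw [step_get? L m hm t ht k hk, bc_snoc]
      rw [hs k hk, hs (altXor k m) (by rw [length_altXor]; omega)]
    have := ih (p ++ [m]) (t.items.foldl (altStep m) t)
      (fun x hx => hms x (List.mem_cons_of_mem _ hx)) ht' hs'
    rw [List.foldl_cons]
    refine ⟨this.1, ?_⟩
    intro k hk
    rw [this.2 k hk, List.append_assoc]
    rfl

theorem altTable_spec (L : Nat) (ms : List (List Bool)) (hms : ∀ m ∈ ms, (m : List Bool).length = L) :
    TInv L (altTable L ms) ∧
    (∀ k : List Bool, k.length = L → (altTable L ms).get? k = bc L ms k) := by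
  have hinit : TInv L (PySem.Dict.empty.insert (List.replicate L false) 0) := by
    refine ⟨PySem.Dict.nodup_keys_insert _ _ _ PySem.Dict.nodup_keys_empty, ?_⟩
    intro k hk
    rcases (PySem.Dict.mem_keys_insert _ _ _ _).1 hk with h | h
    · rw [h]; simp
    · simp [PySem.Dict.keys_empty] at h
  have hinits : ∀ k : List Bool, k.length = L →
      (PySem.Dict.empty.insert (List.replicate L false) 0).get? k = bc L [] k := by
    intro k hk
    rw [PySem.Dict.get?_insert]
    show _ = if k = zeros L then some 0 else none
    by_cases h : k = List.replicate L false
    · rw [if_pos h, if_pos (by rw [h]; rfl)]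
    · rw [if_neg h, if_neg (by intro hh; exact h hh), PySem.Dict.get?_empty]
  have := table_spec L ms [] (PySem.Dict.empty.insert (List.replicate L false) 0) hms hinit hinits
  constructor
  · exact this.1
  · intro k hk
    have h2 := this.2 k hk
    rw [List.nil_append] at h2
    exact h2

-- ---- subset enumeration facts ----
theorem sl_len (L : Nat) (l : List (List Bool)) (hl : ∀ m ∈ l, (m : List Bool).length = L) :
    ∀ kc ∈ sl L l, (kc.1 : List Bool).length = L := by
  induction l with
  | nil =>
    intro kc hkc
    simp only [sl, List.mem_singleton] at hkc
    rw [hkc]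
    simp [zeros]
  | cons m t ih =>
    intro kc hkc
    have hm : m.length = L := hl m List.mem_cons_self
    have ht : ∀ x ∈ t, (x : List Bool).length = L := fun x hx => hl x (List.mem_cons_of_mem _ hx)
    simp only [sl, List.mem_append, List.mem_map] at hkc
    rcases hkc with h | ⟨kc0, hkc0, heq⟩
    · exact ih ht kc h
    · rw [← heq]
      have := ih ht kc0 hkc0
      simp only [length_altXor]
      omega

theorem S1 (L : Nat) (l : List (List Bool)) (hl : ∀ m ∈ l, (m : List Bool).length = L) :
    ∀ kc ∈ sl L l, ole (bc L l kc.1) (some kc.2) := by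
  induction l with
  | nil =>
    intro kc hkc
    simp only [sl, List.mem_singleton] at hkc
    rw [hkc]
    show ole (if zeros L = zeros L then some 0 else none) (some 0)
    rw [if_pos rfl]
    exact ole_refl _
  | cons m t ih =>
    intro kc hkc
    have hm : m.length = L := hl m List.mem_cons_self
    have ht : ∀ x ∈ t, (x : List Bool).length = L := fun x hx => hl x (List.mem_cons_of_mem _ hx)
    simp only [sl, List.mem_append, List.mem_map] at hkc
    rcases hkc with h | ⟨kc0, hkc0, heq⟩
    · have := ih ht kc h
      exact ole_trans _ _ _ (by simpa [bc] using ole_omin_left (bc L t kc.1) (oinc (bc L t (altXor kc.1 m)))) this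
    · have hk0len : (kc0.1 : List Bool).length = L := sl_len L t ht kc0 hkc0
      have hcan : altXor (altXor kc0.1 m) m = kc0.1 := altXor_cancel kc0.1 m (by omega)
      have h1 := ih ht kc0 hkc0
      rw [← heq]
      show ole (bc L (m :: t) (altXor kc0.1 m)) (some (kc0.2 + 1))
      have h2 : ole (oinc (bc L t (altXor (altXor kc0.1 m) m))) (some (kc0.2 + 1)) := by
        rw [hcan]
        intro c hc
        simp only [Option.some.injEq] at hc
        obtain ⟨c', hc', hle⟩ := h1 kc0.2 rfl
        exact ⟨c' + 1, by rw [oinc, hc']; rfl, by omega⟩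
      exact ole_trans _ _ _
        (ole_omin_right (bc L t (altXor kc0.1 m)) (oinc (bc L t (altXor (altXor kc0.1 m) m)))) h2

theorem S2 (L : Nat) (l : List (List Bool)) (hl : ∀ m ∈ l, (m : List Bool).length = L) :
    ∀ (k : List Bool) (c : Int), k.length = L → bc L l k = some c → (k, c) ∈ sl L l := by
  induction l with
  | nil =>
    intro k c hk hbc
    simp only [bc] at hbc
    split_ifs at hbc with h
    · simp only [Option.some.injEq] at hbc
      rw [h, ← hbc]
      simp [sl]
  | cons m t ih =>
    intro k c hk hbc
    have hm : m.length = L := hl m List.mem_cons_self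
    have ht : ∀ x ∈ t, (x : List Bool).length = L := fun x hx => hl x (List.mem_cons_of_mem _ hx)
    have hxk : (altXor k m).length = L := by rw [length_altXor]; omega
    have hcan : altXor (altXor k m) m = k := altXor_cancel k m (by omega)
    simp only [bc] at hbc
    cases h1 : bc L t k with
    | none =>
      cases h2 : bc L t (altXor k m) with
      | none => rw [h1, h2] at hbc; cases hbc
      | some b =>
        rw [h1, h2] at hbc
        simp only [omin, oinc, Option.map_some] at hbc
        simp only [Option.some.injEq] at hbc
        have := ih ht (altXor k m) b hxk h2
        simp only [sl, List.mem_append, List.mem_map]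
        right
        exact ⟨(altXor k m, b), this, by rw [hcan, hbc]⟩
    | some a =>
      cases h2 : bc L t (altXor k m) with
      | none =>
        rw [h1, h2] at hbc
        simp only [omin, oinc, Option.map_none] at hbc
        simp only [Option.some.injEq] at hbc
        have := ih ht k a hk h1
        simp only [sl, List.mem_append]
        left
        rw [← hbc]
        exact this
      | some b =>
        rw [h1, h2] at hbc
        simp only [omin, oinc, Option.map_some, Option.some.injEq] at hbc
        by_cases hab : a ≤ b + 1
        · have hca : c = a := by omega
          have := ih ht k a hk h1
          simp only [sl, List.mem_append]
          left
          rw [hca]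
          exact this
        · have hcb : c = b + 1 := by omega
          have := ih ht (altXor k m) b hxk h2
          simp only [sl, List.mem_append, List.mem_map]
          right
          exact ⟨(altXor k m, b), this, by rw [hcan, hcb]⟩

-- ---- OminL facts ----
theorem OminL_foldr (a : List (Option Int)) (x : Option Int) :
    a.foldr omin x = omin (OminL a) x := by
  induction a with
  | nil => rfl
  | cons h t ih =>
    show omin h (t.foldr omin x) = omin (OminL (h :: t)) x
    rw [ih]
    show _ = omin (omin h (OminL t)) x
    rw [omin_assoc]

theorem OminL_append (a b : List (Option Int)) : OminL (a ++ b) = omin (OminL a) (OminL b) := by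
  unfold OminL
  rw [List.foldr_append]
  exact OminL_foldr a (OminL b)

theorem OminL_oinc (l : List (Option Int)) : OminL (l.map oinc) = oinc (OminL l) := by
  induction l with
  | nil => rfl
  | cons h t ih =>
    show omin (oinc h) (OminL (t.map oinc)) = oinc (omin h (OminL t))
    rw [ih, oinc_omin]

theorem OminL_le_mem (l : List (Option Int)) (x : Option Int) (hx : x ∈ l) : ole (OminL l) x := by
  induction l with
  | nil => cases hx
  | cons h t ih =>
    rcases List.mem_cons.1 hx with rfl | hmem
    · exact ole_omin_left x (OminL t)
    · exact ole_trans _ _ _ (ole_omin_right h (OminL t)) (ih hmem)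

theorem OminL_mono (l1 l2 : List (Option Int))
    (h : ∀ y ∈ l2, ∃ x ∈ l1, ole x y) : ole (OminL l1) (OminL l2) := by
  induction l2 with
  | nil => intro c hc; cases hc
  | cons y t ih =>
    show ole (OminL l1) (omin y (OminL t))
    refine ole_omin_both _ _ _ ?_ (ih (fun z hz => h z (List.mem_cons_of_mem _ hz)))
    obtain ⟨x, hx, hxy⟩ := h y List.mem_cons_self
    exact ole_trans _ _ _ (OminL_le_mem l1 x hx) hxy

-- ---- meet-in-the-middle convolution ----
theorem S0 (L : Nat) (l2 : List (List Bool)) :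
    ∀ (l1 : List (List Bool)) (d : List Bool),
    (∀ m ∈ l1, (m : List Bool).length = L) → d.length = L →
    bc L (l1 ++ l2) d =
      OminL ((sl L l1).map (fun kc => (bc L l2 (altXor kc.1 d)).map (fun c2 => kc.2 + c2))) := by
  intro l1
  induction l1 with
  | nil =>
    intro d _ hd
    rw [List.nil_append]
    show _ = OminL [((bc L l2 (altXor (zeros L) d)).map (fun c2 => (0:Int) + c2))]
    rw [altXor_zeros_left L d hd]
    show _ = omin ((bc L l2 d).map (fun c2 => (0:Int) + c2)) none
    rw [omin_none_right]
    have hmap : ((bc L l2 d).map (fun c2 => (0:Int) + c2)) = bc L l2 d := by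
      cases bc L l2 d <;> simp
    rw [hmap]
  | cons m t ih =>
    intro d h1 hd
    have hm : m.length = L := h1 m List.mem_cons_self
    have ht : ∀ x ∈ t, (x : List Bool).length = L := fun x hx => h1 x (List.mem_cons_of_mem _ hx)
    have hdm : (altXor d m).length = L := by rw [length_altXor]; omega
    show omin (bc L (t ++ l2) d) (oinc (bc L (t ++ l2) (altXor d m))) = _
    rw [ih d ht hd, ih (altXor d m) ht hdm]
    show _ = OminL ((sl L t ++ (sl L t).map fun kc : List Bool × Int => (altXor kc.1 m, kc.2 + 1)).map
      (fun kc => (bc L l2 (altXor kc.1 d)).map (fun c2 => kc.2 + c2)))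
    rw [List.map_append, OminL_append]
    congr 1
    rw [← OminL_oinc, List.map_map, List.map_map]
    apply congrArg OminL
    apply List.map_congr_left
    intro kc hkc
    have hkclen := sl_len L t ht kc hkc
    show oinc ((bc L l2 (altXor kc.1 (altXor d m))).map (fun c2 => kc.2 + c2)) =
      (bc L l2 (altXor (altXor kc.1 m) d)).map (fun c2 => (kc.2 + 1) + c2)
    rw [altXor_assoc, altXor_comm m d]
    cases bc L l2 (altXor kc.1 (altXor d m)) with
    | none => rfl
    | some v =>
      show some (kc.2 + v + 1) = some (kc.2 + 1 + v)
      congr 1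
      omega

theorem comb_step (t2 : PySem.Dict (List Bool) Int) (d : List Bool)
    (b : Int) (kc : List Bool × Int) :
    altCombine t2 d b kc = gcap b ((t2.get? (altXor kc.1 d)).map (fun c2 => kc.2 + c2)) := by
  unfold altCombine
  cases t2.get? (altXor kc.1 d) with
  | none => rfl
  | some c2 =>
    show (if kc.2 + c2 < b then kc.2 + c2 else b) = min b (kc.2 + c2)
    by_cases hlt : kc.2 + c2 < b
    · rw [if_pos hlt]; omega
    · rw [if_neg hlt]; omega

theorem comb_fold (t2 : PySem.Dict (List Bool) Int) (d : List Bool) :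
    ∀ (l : List (List Bool × Int)) (b : Int),
    l.foldl (altCombine t2 d) b =
      gcap b (OminL (l.map (fun kc => (t2.get? (altXor kc.1 d)).map (fun c2 => kc.2 + c2)))) := by
  intro l
  induction l with
  | nil => intro b; rfl
  | cons kc l ih =>
    intro b
    rw [List.foldl_cons, ih, comb_step]
    show gcap (gcap b _) (OminL (l.map _)) = gcap b (OminL (_ :: _))
    rw [gcap_gcap]
    rfl

theorem comb_main (L : Nat) (l1 l2 : List (List Bool)) (d : List Bool)
    (h1 : ∀ m ∈ l1, (m : List Bool).length = L) (h2 : ∀ m ∈ l2, (m : List Bool).length = L)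
    (hd : d.length = L)
    (t1 t2 : PySem.Dict (List Bool) Int)
    (ht1 : TInv L t1) (hs1 : ∀ k : List Bool, k.length = L → t1.get? k = bc L l1 k)
    (hs2 : ∀ k : List Bool, k.length = L → t2.get? k = bc L l2 k) :
    OminL (t1.items.map (fun kc => (t2.get? (altXor kc.1 d)).map (fun c2 => kc.2 + c2))) =
      bc L (l1 ++ l2) d := by
  have hkeylen : ∀ kc ∈ t1.items, (kc.1 : List Bool).length = L :=
    fun kc hkc => ht1.2 kc.1 (PySem.Dict.mem_keys_of_mem_items t1 hkc)
  have hmapeq : t1.items.map (fun kc => (t2.get? (altXor kc.1 d)).map (fun c2 => kc.2 + c2)) =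
      t1.items.map (fun kc => (bc L l2 (altXor kc.1 d)).map (fun c2 => kc.2 + c2)) := by
    apply List.map_congr_left
    intro kc hkc
    rw [hs2 (altXor kc.1 d) (by rw [length_altXor, hkeylen kc hkc]; omega)]
  rw [hmapeq]
  rw [S0 L l2 l1 d h1 hd]
  apply ole_antisymm
  · apply OminL_mono
    intro y hy
    obtain ⟨kc, hkc, hfy⟩ := List.mem_map.1 hy
    have hkclen := sl_len L l1 h1 kc hkc
    obtain ⟨c', hc', hle⟩ := S1 L l1 h1 kc hkc kc.2 rfl
    have hget : t1.get? kc.1 = some c' := by rw [hs1 kc.1 hkclen]; exact hc'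
    have hitem : (kc.1, c') ∈ t1.items := PySem.Dict.mem_items_of_get?_eq_some t1 hget
    refine ⟨(bc L l2 (altXor kc.1 d)).map (fun c2 => c' + c2), ?_, ?_⟩
    · exact List.mem_map.2 ⟨(kc.1, c'), hitem, rfl⟩
    · rw [← hfy]
      cases bc L l2 (altXor kc.1 d) with
      | none => intro c hc; cases hc
      | some v =>
        intro c hc
        simp only [Option.map_some, Option.some.injEq] at hc
        exact ⟨c' + v, rfl, by omega⟩
  · apply OminL_mono
    intro y hy
    obtain ⟨kc, hkc, hfy⟩ := List.mem_map.1 hy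
    have hkclen := hkeylen kc hkc
    have hget : t1.get? kc.1 = some kc.2 := by
      have : (kc.1, kc.2) ∈ t1.items := by simpa using hkc
      exact PySem.Dict.get?_of_mem_items t1 this ht1.1
    have hbc : bc L l1 kc.1 = some kc.2 := by rw [← hs1 kc.1 hkclen]; exact hget
    have hsl : (kc.1, kc.2) ∈ sl L l1 := S2 L l1 h1 kc.1 kc.2 hkclen hbc
    refine ⟨(bc L l2 (altXor kc.1 d)).map (fun c2 => kc.2 + c2), ?_, ?_⟩
    · exact List.mem_map.2 ⟨(kc.1, kc.2), hsl, rfl⟩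
    · rw [← hfy]
      exact ole_refl _

-- ---- B-side characterisation and final assembly ----
theorem press_alt_base (state goal : List Bool) (ops : List (List Int)) (current : Int)
    (hb : (ops.length : Int) ≤ current) :
    press_alt state goal ops current = if state = goal then 0 else (ops.length : Int) := by
  simp only [press_alt]
  rw [if_pos hb]

theorem press_alt_main (state goal : List Bool) (ops : List (List Int)) (current : Int)
    (hb : ¬ (ops.length : Int) ≤ current) (h0 : 0 ≤ current) (hlen : state.length = goal.length)
    (hvalid : ∀ op ∈ remA ops current, ∀ i ∈ op, -(state.length : Int) ≤ i ∧ i < (state.length : Int)) :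
    press_alt state goal ops current =
      gcap (ops.length)
        (bc state.length ((remA ops current).map (mEffect state.length)) (altXor state goal)) := by
  simp only [press_alt]
  rw [if_neg hb]
  have hrem : PySem.List.slice ops (some current) none = remA ops current := by
    rw [PySem.List.slice_from ops h0]; rfl
  rw [hrem]
  have hmeq : (remA ops current).map (altEffect state.length) =
      (remA ops current).map (mEffect state.length) :=
    List.map_congr_left (fun op hop => altEffect_eq_mEffect _ _ (hvalid op hop))
  rw [hmeq]
  set masks := (remA ops current).map (mEffect state.length) with hmasks
  rw [PySem.List.slice_to_natCast masks (masks.length / 2),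
    PySem.List.slice_from_natCast masks (masks.length / 2)]
  have hmlen : ∀ m ∈ masks, (m : List Bool).length = state.length := by
    intro m hm
    obtain ⟨op, _, rfl⟩ := List.mem_map.1 hm
    exact length_mEffect _ _
  have h1 : ∀ m ∈ masks.take (masks.length / 2), (m : List Bool).length = state.length :=
    fun m hm => hmlen m (List.mem_of_mem_take hm)
  have h2 : ∀ m ∈ masks.drop (masks.length / 2), (m : List Bool).length = state.length :=
    fun m hm => hmlen m (List.mem_of_mem_drop hm)
  have hdiag : (altXor state goal).length = state.length := by rw [length_altXor]; omega
  obtain ⟨ht1, hs1⟩ := altTable_spec state.length (masks.take (masks.length / 2)) h1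
  obtain ⟨ht2, hs2⟩ := altTable_spec state.length (masks.drop (masks.length / 2)) h2
  rw [comb_fold]
  rw [comb_main state.length (masks.take (masks.length / 2)) (masks.drop (masks.length / 2))
    (altXor state goal) h1 h2 hdiag _ _ ht1 hs1 hs2]
  rw [List.take_append_drop]

-- ===== VERDICT (by name: the statement is the Claim_ definition above) =====
theorem press_spec : Claim_equal_press := by
  intro state goal ops current _hdom hpre
  unfold Spec_press
  by_cases hb : (ops.length : Int) ≤ current
  · rw [press, if_pos hb, press_alt_base state goal ops current hb]
  · rcases hpre with hpre | ⟨hge, hlen, hvalid0⟩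
    · exact absurd hpre hb
    have hvalid : ∀ op ∈ remA ops current, ∀ i ∈ op,
        -(state.length : Int) ≤ i ∧ i < (state.length : Int) := hvalid0
    rw [press_bc goal ops (((ops.length : Int) - current).toNat) current state (le_refl _)
      hlen hge hvalid]
    rw [press_alt_main state goal ops current hb hge hlen hvalid]
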